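-- pv_equiv track=rewrite | github.com/Aryudesu/ABC | ABC/300_399/353/B.py | calc
-- ===== SOURCE A (Python) =====
-- def calc(N, K, A):
--     result = 0
--     idx = 0
--     count = 0
--     while idx < N:
--         count = 0
--         count += A[idx]
--         idx += 1
--         while idx < N:
--             if count + A[idx] <= K:
--                 count += A[idx]
--                 idx += 1
--             else:
--                 break
--         result += 1
--     return result
-- ===== SOURCE B (Python) =====
-- def calc(N, K, A):
--     # Different algorithm: prefix sums + a max segment tree answering "first index j
--     # with S[j+1] > K + S[i]", plus a right-to-left suffix DP f[i] = 1 + f[end(i)].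
--     n = N
--     if n <= 0:
--         return 0
--     S = [0]
--     s = 0
--     for x in A[:n]:
--         s += x
--         S.append(s)
--     M = S[1:]
--
--     def build(lo, hi):
--         if hi - lo == 1:
--             return (M[lo], None, None)
--         mid = (lo + hi) // 2
--         L = build(lo, mid)
--         R = build(mid, hi)
--         mx = L[0] if L[0] > R[0] else R[0]
--         return (mx, L, R)
--
--     tree = build(0, n)
--
--     def first_gt(node, lo, hi, ql, t):
--         # leftmost j in [max(lo, ql), hi) with M[j] > t, else n
--         if hi <= ql or node[0] <= t:
--             return n
--         if hi - lo == 1: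
--             return lo
--         mid = (lo + hi) // 2
--         res = first_gt(node[1], lo, mid, ql, t)
--         if res < n:
--             return res
--         return first_gt(node[2], mid, hi, ql, t)
--
--     f = [0] * (n + 1)
--     for i in range(n - 1, -1, -1):
--         f[i] = 1 + f[first_gt(tree, 0, n, i + 1, K + S[i])]
--     return f[0]
-- ===== Notes on version B (the rewrite author's own statement) =====
-- stated objective: alternative
-- what changed: Replaced A's left-to-right nested greedy loops by a different algorithm: build prefix sums once, build a max segment tree over them, find each group's end as the leftmost index whose prefix sum exceeds K + S[start] by tree descent, and count groups with a right-to-left suffix DP f[i] = 1 + f[end(i)].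
import Mathlib
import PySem

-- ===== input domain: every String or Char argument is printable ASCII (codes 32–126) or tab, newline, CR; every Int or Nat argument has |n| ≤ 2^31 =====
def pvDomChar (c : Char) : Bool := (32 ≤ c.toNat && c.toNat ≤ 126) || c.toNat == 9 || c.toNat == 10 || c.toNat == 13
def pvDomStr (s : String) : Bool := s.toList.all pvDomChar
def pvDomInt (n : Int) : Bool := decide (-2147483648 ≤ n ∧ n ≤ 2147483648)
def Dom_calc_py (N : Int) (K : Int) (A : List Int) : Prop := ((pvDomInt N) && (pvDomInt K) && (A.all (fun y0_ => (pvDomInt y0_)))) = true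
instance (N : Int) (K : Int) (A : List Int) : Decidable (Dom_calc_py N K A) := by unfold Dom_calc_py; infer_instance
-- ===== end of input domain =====

-- B replaces A's nested greedy loops by a different algorithm of the same exact value:
-- prefix sums + a max segment tree locating each group's end + a right-to-left suffix DP.

-- ===== PORT A =====
-- inner 'while idx < N: if count + A[idx] <= K: … else: break' — returns final (count, idx)
def calcInnerA (N K : Int) (A : List Int) (count idx : Int) : Int × Int :=
  if _h : idx < N then
    if count + PySem.List.pyGetD A idx 0 ≤ K then
      calcInnerA N K A (count + PySem.List.pyGetD A idx 0) (idx + 1)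
    else (count, idx)
  else (count, idx)
termination_by (N - idx).toNat
decreasing_by omega

-- the port cites this for outer-loop termination: the inner loop never moves idx backwards
theorem calcInnerA_le (N K : Int) (A : List Int) (count idx : Int) :
    idx ≤ (calcInnerA N K A count idx).2 := by
  unfold calcInnerA
  split
  · split
    · have := calcInnerA_le N K A (count + PySem.List.pyGetD A idx 0) (idx + 1)
      omega
    · simp
  · simp
termination_by (N - idx).toNat
decreasing_by omega

-- outer 'while idx < N: count = A[idx]; idx += 1; <inner>; result += 1'
def calcOuterA (N K : Int) (A : List Int) (result idx : Int) : Int :=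
  if _h : idx < N then
    let s := calcInnerA N K A (0 + PySem.List.pyGetD A idx 0) (idx + 1)
    calcOuterA N K A (result + 1) s.2
  else result
termination_by (N - idx).toNat
decreasing_by
  have := calcInnerA_le N K A (0 + PySem.List.pyGetD A idx 0) (idx + 1)
  omega

def calc_py (N : Int) (K : Int) (A : List Int) : Int :=
  calcOuterA N K A 0 0

-- ===== PORT B =====
-- segment tree node (Python tuple (max, left, right); leaves carry the value)
inductive SegB where
  | leaf : Int → SegB
  | node : Int → SegB → SegB → SegB
deriving Repr

def segMax : SegB → Int
  | .leaf v => v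
  | .node m _ _ => m

-- the port cites this for build/query termination: the midpoint splits [lo,hi) strictly
theorem midB_bounds (lo hi : Int) (h : lo + 2 ≤ hi) :
    lo + 1 ≤ PySem.Int.floordiv (lo + hi) 2 ∧ PySem.Int.floordiv (lo + hi) 2 + 1 ≤ hi := by
  rw [PySem.Int.floordiv_eq_ediv_of_pos (by norm_num)]
  omega

-- 'def build(lo, hi)': Python is only called with hi - lo ≥ 1; '≤ 1' (rather than '= 1') only makes it total
def buildB (M : List Int) (lo hi : Int) : SegB :=
  if _h : hi - lo ≤ 1 then .leaf (PySem.List.pyGetD M lo 0)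
  else
    let mid := PySem.Int.floordiv (lo + hi) 2
    let L := buildB M lo mid
    let R := buildB M mid hi
    .node (if segMax L > segMax R then segMax L else segMax R) L R
termination_by (hi - lo).toNat
decreasing_by
  · have := midB_bounds lo hi (by omega); omega
  · have := midB_bounds lo hi (by omega); omega

-- 'def first_gt(node, lo, hi, ql, t)': Python's 'hi - lo == 1' test holds exactly at leaves of build
def firstGT (n : Int) (node : SegB) (lo hi ql t : Int) : Int :=
  if hi ≤ ql ∨ segMax node ≤ t then n
  else
    match node with
    | .leaf _ => lo
    | .node _ L R =>
        let mid := PySem.Int.floordiv (lo + hi) 2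
        let res := firstGT n L lo mid ql t
        if res < n then res else firstGT n R mid hi ql t

-- 'S = [0]; s = 0; for x in A[:n]: s += x; S.append(s)'
def prefixS (A : List Int) (n : Int) : List Int :=
  ((PySem.List.slice A none (some n)).foldl
    (fun st x => (st.1 ++ [st.2 + x], st.2 + x)) ([(0 : Int)], (0 : Int))).1

def calc_py_alt (N : Int) (K : Int) (A : List Int) : Int :=
  let n := N
  if n ≤ 0 then 0
  else
    let S := prefixS A n
    let M := PySem.List.slice S (some 1) none
    let tree := buildB M 0 n
    let f := (PySem.List.pyRange (n - 1) (-1) (-1)).foldl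
      (fun f i =>
        PySem.List.pySetD f i
          (1 + PySem.List.pyGetD f (firstGT n tree 0 n (i + 1) (K + PySem.List.pyGetD S i 0)) 0))
      (List.replicate (n + 1).toNat 0)
    PySem.List.pyGetD f 0 0

-- ===== PRECONDITION & SPEC =====
-- Pre_ excludes exactly the inputs where Python A raises IndexError (it reads A[idx] for every idx < N).
def Pre_calc_py (N : Int) (K : Int) (A : List Int) : Prop := N ≤ (A.length : Int)
instance (N : Int) (K : Int) (A : List Int) : Decidable (Pre_calc_py N K A) := by unfold Pre_calc_py; infer_instance
def pvWitness_calc_py : Int × Int × List Int := (4, 5, [2, 3, 4, 1])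

def Spec_calc_py (N : Int) (K : Int) (A : List Int) (out : Int) : Prop := out = calc_py_alt N K A
instance (N : Int) (K : Int) (A : List Int) (out : Int) : Decidable (Spec_calc_py N K A out) := by unfold Spec_calc_py; infer_instance

-- ===== CLAIM (what is proved, stated in full; the proofs are below) =====
def Claim_equal_calc_py : Prop := ∀ (N : Int) (K : Int) (A : List Int), Dom_calc_py N K A → Pre_calc_py N K A → Spec_calc_py N K A (calc_py N K A)

-- ===== LEMMAS AND PROOFS =====

-- sum of the first j elements of A (the mathematical meeting point of the two programs)
def Stk (A : List Int) (j : Int) : Int := (A.take j.toNat).sum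

theorem Stk_succ (A : List Int) (j : Int) (h0 : 0 ≤ j) (h1 : j < (A.length : Int)) :
    Stk A (j + 1) = Stk A j + PySem.List.pyGetD A j 0 := by
  obtain ⟨m, rfl⟩ : ∃ m : Nat, j = (m : Int) := ⟨j.toNat, by omega⟩
  have hm : m < A.length := by omega
  unfold Stk
  have h2 : ((m : Int) + 1).toNat = m + 1 := by omega
  rw [h2, Int.toNat_natCast, PySem.List.pyGetD_natCast, List.getD_eq_getElem _ _ hm]
  exact List.sum_take_succ _ _ hm

-- running partial sums with offset s0 (what the S-building loop appends)
def psums (s0 : Int) : List Int → List Int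
  | [] => []
  | x :: t => (s0 + x) :: psums (s0 + x) t

theorem foldS (xs : List Int) (L0 : List Int) (s0 : Int) :
    (xs.foldl (fun st x => (st.1 ++ [st.2 + x], st.2 + x)) (L0, s0)).1 = L0 ++ psums s0 xs := by
  induction xs generalizing L0 s0 with
  | nil => simp [psums]
  | cons x t ih =>
    rw [List.foldl_cons]
    have := ih (L0 ++ [s0 + x]) (s0 + x)
    simp only [psums]
    rw [this, List.append_assoc]
    rfl

theorem psums_getD (xs : List Int) (s0 : Int) (k : Nat) (hk : k < xs.length) :
    (psums s0 xs).getD k 0 = s0 + (xs.take (k + 1)).sum := by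
  induction xs generalizing s0 k with
  | nil => simp at hk
  | cons x t ih =>
    cases k with
    | zero => simp [psums]
    | succ k =>
      simp only [psums, List.getD_cons_succ, List.take_succ_cons, List.sum_cons]
      rw [ih (s0 + x) k (by simpa using hk)]
      ring

theorem prefixS_eq (A : List Int) (n : Int) (hn : 0 ≤ n) :
    prefixS A n = 0 :: psums 0 (A.take n.toNat) := by
  unfold prefixS
  rw [PySem.List.slice_to A hn, foldS]
  rfl

theorem getS (A : List Int) (n : Int) (hn : 0 < n) (hlen : n ≤ (A.length : Int))
    (j : Int) (h0 : 0 ≤ j) (h1 : j ≤ n) :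
    PySem.List.pyGetD (prefixS A n) j 0 = Stk A j := by
  obtain ⟨k, rfl⟩ : ∃ k : Nat, j = (k : Int) := ⟨j.toNat, by omega⟩
  rw [prefixS_eq A n (le_of_lt hn), PySem.List.pyGetD_natCast]
  cases k with
  | zero => simp [Stk]
  | succ k =>
    rw [List.getD_cons_succ]
    have hk : k < (A.take n.toNat).length := by
      rw [List.length_take]
      omega
    rw [psums_getD _ _ _ hk, List.take_take]
    have hmin : min (k + 1) n.toNat = k + 1 := by omega
    rw [hmin]
    simp [Stk]

theorem getM (A : List Int) (n : Int) (hn : 0 < n) (hlen : n ≤ (A.length : Int))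
    (j : Int) (h0 : 0 ≤ j) (h1 : j < n) :
    PySem.List.pyGetD (PySem.List.slice (prefixS A n) (some 1) none) j 0 = Stk A (j + 1) := by
  obtain ⟨k, rfl⟩ : ∃ k : Nat, j = (k : Int) := ⟨j.toNat, by omega⟩
  rw [PySem.List.slice_from _ (by norm_num), prefixS_eq A n (le_of_lt hn)]
  have h1 : ((1 : Int)).toNat = 1 := rfl
  rw [h1, List.drop_one, List.tail_cons, PySem.List.pyGetD_natCast]
  have hk : k < (A.take n.toNat).length := by
    rw [List.length_take]
    omega
  rw [psums_getD _ _ _ hk, List.take_take]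
  have hmin : min (k + 1) n.toNat = k + 1 := by omega
  rw [hmin]
  unfold Stk
  have : ((k : Int) + 1).toNat = k + 1 := by omega
  rw [this]
  ring

-- unfolding equations of buildB and firstGT on my port's two branch shapes
theorem buildB_eq_leaf (M : List Int) (lo hi : Int) (hc : hi - lo ≤ 1) :
    buildB M lo hi = .leaf (PySem.List.pyGetD M lo 0) := by
  conv_lhs => rw [buildB.eq_def]
  rw [dif_pos hc]

theorem buildB_eq_node (M : List Int) (lo hi : Int) (hc : ¬ hi - lo ≤ 1) :
    buildB M lo hi = .node
      (if segMax (buildB M lo (PySem.Int.floordiv (lo + hi) 2)) >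
          segMax (buildB M (PySem.Int.floordiv (lo + hi) 2) hi) then
        segMax (buildB M lo (PySem.Int.floordiv (lo + hi) 2))
      else segMax (buildB M (PySem.Int.floordiv (lo + hi) 2) hi))
      (buildB M lo (PySem.Int.floordiv (lo + hi) 2))
      (buildB M (PySem.Int.floordiv (lo + hi) 2) hi) := by
  conv_lhs => rw [buildB.eq_def]
  rw [dif_neg hc]

theorem segMax_leaf (v : Int) : segMax (.leaf v) = v := rfl

theorem segMax_node (m : Int) (L R : SegB) : segMax (.node m L R) = m := rfl

theorem firstGT_of_cond (n : Int) (nd : SegB) (lo hi ql t : Int)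
    (h : hi ≤ ql ∨ segMax nd ≤ t) : firstGT n nd lo hi ql t = n := by
  conv_lhs => rw [firstGT.eq_def]
  rw [if_pos h]

theorem firstGT_leaf (n v lo hi ql t : Int) (h : ¬ (hi ≤ ql ∨ v ≤ t)) :
    firstGT n (.leaf v) lo hi ql t = lo := by
  conv_lhs => rw [firstGT.eq_def]
  rw [segMax_leaf, if_neg h]

theorem firstGT_node (n m : Int) (L R : SegB) (lo hi ql t : Int) (h : ¬ (hi ≤ ql ∨ m ≤ t)) :
    firstGT n (.node m L R) lo hi ql t =
      if firstGT n L lo (PySem.Int.floordiv (lo + hi) 2) ql t < n then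
        firstGT n L lo (PySem.Int.floordiv (lo + hi) 2) ql t
      else firstGT n R (PySem.Int.floordiv (lo + hi) 2) hi ql t := by
  conv_lhs => rw [firstGT.eq_def]
  rw [segMax_node, if_neg h]

-- the tree's cached max bounds every element of its segment
theorem buildMax_ub (M : List Int) (lo hi : Int) (h : lo + 1 ≤ hi) (j : Int)
    (hj0 : lo ≤ j) (hj1 : j < hi) :
    PySem.List.pyGetD M j 0 ≤ segMax (buildB M lo hi) := by
  by_cases hc : hi - lo ≤ 1
  · rw [buildB_eq_leaf M lo hi hc]
    have hj : j = lo := by omega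
    subst hj
    exact le_of_eq rfl
  · rw [buildB_eq_node M lo hi hc]
    have hm := midB_bounds lo hi (by omega)
    rw [segMax_node]
    by_cases hj : j < PySem.Int.floordiv (lo + hi) 2
    · have := buildMax_ub M lo (PySem.Int.floordiv (lo + hi) 2) (by omega) j hj0 hj
      split_ifs <;> omega
    · have := buildMax_ub M (PySem.Int.floordiv (lo + hi) 2) hi (by omega) j (by omega) hj1
      split_ifs <;> omega
termination_by (hi - lo).toNat
decreasing_by
  · have := midB_bounds lo hi (by omega); omega
  · have := midB_bounds lo hi (by omega); omega

-- query characterisation: firstGT returns n (nothing > t in [max(lo,ql),hi)) or the least such index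
theorem firstGT_spec (M : List Int) (n : Int) (lo hi : Int) (h1 : lo + 1 ≤ hi) (h2 : hi ≤ n)
    (ql t : Int) :
    (firstGT n (buildB M lo hi) lo hi ql t = n ∧
      ∀ j, lo ≤ j → ql ≤ j → j < hi → PySem.List.pyGetD M j 0 ≤ t) ∨
    (lo ≤ firstGT n (buildB M lo hi) lo hi ql t ∧
      ql ≤ firstGT n (buildB M lo hi) lo hi ql t ∧
      firstGT n (buildB M lo hi) lo hi ql t < hi ∧
      t < PySem.List.pyGetD M (firstGT n (buildB M lo hi) lo hi ql t) 0 ∧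
      ∀ j, lo ≤ j → ql ≤ j → j < firstGT n (buildB M lo hi) lo hi ql t →
        PySem.List.pyGetD M j 0 ≤ t) := by
  by_cases hq : hi ≤ ql ∨ segMax (buildB M lo hi) ≤ t
  · rw [firstGT_of_cond n (buildB M lo hi) lo hi ql t hq]
    left
    refine ⟨rfl, fun j hj1 hj2 hj3 => ?_⟩
    rcases hq with h | h
    · omega
    · exact le_trans (buildMax_ub M lo hi h1 j hj1 hj3) h
  · rw [not_or, not_le, not_le] at hq
    obtain ⟨hq1, hq2⟩ := hq
    by_cases hc : hi - lo ≤ 1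
    · rw [buildB_eq_leaf M lo hi hc] at hq2 ⊢
      rw [segMax_leaf] at hq2
      rw [firstGT_leaf n _ lo hi ql t (by omega)]
      right
      exact ⟨le_refl lo, by omega, by omega, hq2, fun j hj1 hj2 hj3 => by omega⟩
    · have hm := midB_bounds lo hi (by omega)
      rw [buildB_eq_node M lo hi hc] at hq2 ⊢
      rw [segMax_node] at hq2
      rw [firstGT_node n _ _ _ lo hi ql t (by omega)]
      have hIHl := firstGT_spec M n lo (PySem.Int.floordiv (lo + hi) 2) (by omega) (by omega) ql t
      have hIHr := firstGT_spec M n (PySem.Int.floordiv (lo + hi) 2) hi (by omega) h2 ql t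
      by_cases hres : firstGT n (buildB M lo (PySem.Int.floordiv (lo + hi) 2)) lo
          (PySem.Int.floordiv (lo + hi) 2) ql t < n
      · rw [if_pos hres]
        rcases hIHl with ⟨hrn, _⟩ | ⟨g0, g1, g2, g3, g4⟩
        · omega
        · right
          exact ⟨g0, g1, by omega, g3, fun j hj1 hj2 hj3 => g4 j hj1 hj2 hj3⟩
      · rw [if_neg hres]
        rcases hIHl with ⟨hrn, hall⟩ | ⟨g0, g1, g2, g3, g4⟩
        · rcases hIHr with ⟨hrn2, hall2⟩ | ⟨k0, k1, k2, k3, k4⟩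
          · left
            refine ⟨hrn2, fun j hj1 hj2 hj3 => ?_⟩
            by_cases hjm : j < PySem.Int.floordiv (lo + hi) 2
            · exact hall j hj1 hj2 hjm
            · exact hall2 j (by omega) hj2 hj3
          · right
            refine ⟨by omega, k1, k2, k3, fun j hj1 hj2 hj3 => ?_⟩
            by_cases hjm : j < PySem.Int.floordiv (lo + hi) 2
            · exact hall j hj1 hj2 hjm
            · exact k4 j (by omega) hj2 hj3
        · omega
termination_by (hi - lo).toNat
decreasing_by
  · have := midB_bounds lo hi (by omega); omega
  · have := midB_bounds lo hi (by omega); omega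

-- A's inner loop characterised against prefix sums
theorem innerA_char (n K : Int) (A : List Int) (hlen : n ≤ (A.length : Int)) (c idx : Int)
    (h0 : 0 ≤ idx) (h1 : idx ≤ n) :
    idx ≤ (calcInnerA n K A c idx).2 ∧ (calcInnerA n K A c idx).2 ≤ n ∧
    (∀ j, idx ≤ j → j < (calcInnerA n K A c idx).2 → c + (Stk A (j + 1) - Stk A idx) ≤ K) ∧
    ((calcInnerA n K A c idx).2 < n →
      K < c + (Stk A ((calcInnerA n K A c idx).2 + 1) - Stk A idx)) := by
  unfold calcInnerA
  by_cases hlt : idx < n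
  · rw [dif_pos hlt]
    have hs := Stk_succ A idx h0 (by omega)
    by_cases hle : c + PySem.List.pyGetD A idx 0 ≤ K
    · rw [if_pos hle]
      obtain ⟨i1, i2, i3, i4⟩ :=
        innerA_char n K A hlen (c + PySem.List.pyGetD A idx 0) (idx + 1) (by omega) (by omega)
      refine ⟨by omega, i2, ?_, ?_⟩
      · intro j hj1 hj2
        by_cases hj : idx + 1 ≤ j
        · have := i3 j hj hj2
          omega
        · have hje : j = idx := by omega
          subst hje
          omega
      · intro h
        have := i4 h
        omega
    · rw [if_neg hle]
      rw [show ((c, idx) : Int × Int).2 = idx from rfl]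
      exact ⟨le_refl idx, by omega, fun j hj1 hj2 => by omega, fun _ => by omega⟩
  · rw [dif_neg hlt]
    rw [show ((c, idx) : Int × Int).2 = idx from rfl]
    exact ⟨le_refl idx, by omega, fun j hj1 hj2 => by omega, fun h => by omega⟩
termination_by (n - idx).toNat
decreasing_by omega

-- the greedy group count from position i, the common recursion both programs compute
def gRec (n K : Int) (A : List Int) (i : Int) : Int :=
  if _h : i < n then
    1 + gRec n K A (calcInnerA n K A (0 + PySem.List.pyGetD A i 0) (i + 1)).2
  else 0
termination_by (n - i).toNat
decreasing_by
  have := calcInnerA_le n K A (0 + PySem.List.pyGetD A i 0) (i + 1)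
  omega

theorem outer_g (n K : Int) (A : List Int) (r i : Int) :
    calcOuterA n K A r i = r + gRec n K A i := by
  unfold calcOuterA gRec
  by_cases h : i < n
  · rw [dif_pos h, dif_pos h]
    rw [outer_g n K A (r + 1)]
    ring
  · rw [dif_neg h, dif_neg h]
    ring
termination_by (n - i).toNat
decreasing_by
  have := calcInnerA_le n K A (0 + PySem.List.pyGetD A i 0) (i + 1)
  omega

-- B's tree query computes exactly the end index of A's inner loop
theorem q_eq_endA (n K : Int) (A : List Int) (hn : 0 < n) (hlen : n ≤ (A.length : Int))
    (i : Int) (h0 : 0 ≤ i) (h1 : i < n) :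
    firstGT n (buildB (PySem.List.slice (prefixS A n) (some 1) none) 0 n) 0 n (i + 1)
      (K + PySem.List.pyGetD (prefixS A n) i 0)
      = (calcInnerA n K A (0 + PySem.List.pyGetD A i 0) (i + 1)).2 := by
  have hSi : PySem.List.pyGetD (prefixS A n) i 0 = Stk A i := getS A n hn hlen i h0 (by omega)
  rw [hSi]
  obtain ⟨e1, e2, e3, e4⟩ :=
    innerA_char n K A hlen (0 + PySem.List.pyGetD A i 0) (i + 1) (by omega) (by omega)
  have hSi1 : Stk A (i + 1) = Stk A i + PySem.List.pyGetD A i 0 := Stk_succ A i h0 (by omega)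
  have hq := firstGT_spec (PySem.List.slice (prefixS A n) (some 1) none) n 0 n (by omega)
    (le_refl n) (i + 1) (K + Stk A i)
  rcases hq with ⟨hrn, hall⟩ | ⟨g0, g1, g2, g3, g4⟩
  · rw [hrn]
    by_cases he : (calcInnerA n K A (0 + PySem.List.pyGetD A i 0) (i + 1)).2 < n
    · exfalso
      have h4 := e4 he
      have h5 := hall (calcInnerA n K A (0 + PySem.List.pyGetD A i 0) (i + 1)).2 (by omega) e1 he
      rw [getM A n hn hlen _ (by omega) he] at h5
      omega
    · omega
  · rw [getM A n hn hlen _ g0 g2] at g3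
    by_cases hre : firstGT n (buildB (PySem.List.slice (prefixS A n) (some 1) none) 0 n) 0 n
        (i + 1) (K + Stk A i)
        < (calcInnerA n K A (0 + PySem.List.pyGetD A i 0) (i + 1)).2
    · exfalso
      have := e3 _ g1 hre
      omega
    · by_cases her : (calcInnerA n K A (0 + PySem.List.pyGetD A i 0) (i + 1)).2 <
          firstGT n (buildB (PySem.List.slice (prefixS A n) (some 1) none) 0 n) 0 n
            (i + 1) (K + Stk A i)
      · exfalso
        have h4 := e4 (by omega)
        have h5 := g4 _ (by omega) e1 her
        rw [getM A n hn hlen _ (by omega) (by omega)] at h5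
        omega
      · omega

-- indexed read after an in-range write (Int indices, as the DP fold uses them)
theorem pyGetD_pySetD_int (f : List Int) (a v k : Int) (h0 : 0 ≤ a) (hk : 0 ≤ k)
    (h : a.toNat < f.length) :
    PySem.List.pyGetD (PySem.List.pySetD f a v) k 0 =
      if k = a then v else PySem.List.pyGetD f k 0 := by
  obtain ⟨m, rfl⟩ : ∃ m : Nat, a = (m : Int) := ⟨a.toNat, by omega⟩
  obtain ⟨km, rfl⟩ : ∃ km : Nat, k = (km : Int) := ⟨k.toNat, by omega⟩
  rw [PySem.List.pySetD_natCast, PySem.List.pyGetD_natCast, PySem.List.pyGetD_natCast]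
  rw [List.getD_eq_getElem?_getD, List.getD_eq_getElem?_getD, List.getElem?_set]
  simp only [Int.toNat_natCast] at h
  by_cases hkm : km = m
  · subst hkm
    simp [h]
  · have hne : ((km : Int)) ≠ ((m : Int)) := by omega
    simp [hne, Ne.symm hkm]

-- invariant of the right-to-left DP fold: every processed slot k holds gRec k
theorem dp_inv (n K : Int) (A : List Int) (hn : 0 < n) (hlen : n ≤ (A.length : Int))
    (a : Int) (ha : a < n) (f : List Int) (hf : f.length = n.toNat + 1)
    (hinv : ∀ k : Int, a < k → k ≤ n → PySem.List.pyGetD f k 0 = gRec n K A k) :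
    ∀ k : Int, -1 < k → k ≤ n →
      PySem.List.pyGetD
        ((PySem.List.pyRange a (-1) (-1)).foldl
          (fun f i =>
            PySem.List.pySetD f i
              (1 + PySem.List.pyGetD f
                (firstGT n (buildB (PySem.List.slice (prefixS A n) (some 1) none) 0 n) 0 n (i + 1)
                  (K + PySem.List.pyGetD (prefixS A n) i 0)) 0))
          f) k 0 = gRec n K A k := by
  intro k hk1 hk2
  by_cases ha0 : a ≤ -1
  · rw [PySem.List.pyRange_neg_one_eq_nil ha0, List.foldl_nil]
    exact hinv k (by omega) hk2
  · rw [PySem.List.pyRange_neg_one_cons (by omega : (-1 : Int) < a), List.foldl_cons]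
    set e := (calcInnerA n K A (0 + PySem.List.pyGetD A a 0) (a + 1)).2 with he
    have hqa := q_eq_endA n K A hn hlen a (by omega) ha
    obtain ⟨e1, e2, _, _⟩ :=
      innerA_char n K A hlen (0 + PySem.List.pyGetD A a 0) (a + 1) (by omega) (by omega)
    have hga : gRec n K A a = 1 + gRec n K A e := by
      rw [gRec, dif_pos ha]
    have hv : 1 + PySem.List.pyGetD f
        (firstGT n (buildB (PySem.List.slice (prefixS A n) (some 1) none) 0 n) 0 n (a + 1)
          (K + PySem.List.pyGetD (prefixS A n) a 0)) 0 = gRec n K A a := by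
      rw [hqa, ← he, hinv e (by omega) e2, hga]
    refine dp_inv n K A hn hlen (a - 1) (by omega) _ ?_ ?_ k hk1 hk2
    · rw [PySem.List.length_pySetD]
      exact hf
    · intro k' hk1' hk2'
      rw [pyGetD_pySetD_int f a _ k' (by omega) (by omega) (by omega)]
      by_cases hka : k' = a
      · rw [if_pos hka, hv, hka]
      · rw [if_neg hka]
        exact hinv k' (by omega) hk2'
termination_by (a + 1).toNat
decreasing_by omega

-- ===== VERDICT (by name: the statement is the Claim_ definition above) =====
theorem replicate_getD (n : Int) (k : Int) (h0 : 0 ≤ k) :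
    PySem.List.pyGetD (List.replicate (n + 1).toNat (0 : Int)) k 0 = 0 := by
  obtain ⟨m, rfl⟩ : ∃ m : Nat, k = (m : Int) := ⟨k.toNat, by omega⟩
  rw [PySem.List.pyGetD_natCast]
  rcases Nat.lt_or_ge m (n + 1).toNat with h | h
  · rw [List.getD_eq_getElem _ _ (by simpa using h)]
    simp
  · rw [List.getD_eq_default _ _ (by simpa using h)]

theorem calc_py_spec : Claim_equal_calc_py := by
  intro N K A _ hpre
  unfold Spec_calc_py calc_py calc_py_alt
  by_cases hn : N ≤ 0
  · rw [if_pos hn]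
    unfold calcOuterA
    rw [dif_neg (by omega)]
  · rw [if_neg hn]
    rw [outer_g]
    have hd := dp_inv N K A (by omega) hpre (N - 1) (by omega)
      (List.replicate (N + 1).toNat 0)
      (by rw [List.length_replicate]; omega)
      (fun k hk1 hk2 => by
        rw [replicate_getD N k (by omega)]
        have hkN : k = N := by omega
        rw [hkN, gRec, dif_neg (by omega)])
      0 (by omega) (by omega)
    rw [hd]
    ring
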